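-- pv_equiv track=rewrite | github.com/3rr4t1c/superspreader_detection | tfib/evaluations.py | ranking_normalizer
-- ===== SOURCE A (Python) =====
-- def ranking_normalizer(ascending_pair_list):
--
--     output_ranking = []
--     n = 0
--     for i, (k, v) in enumerate(ascending_pair_list):
--
--         if output_ranking and v != ascending_pair_list[i-1][1]:
--             n += 1
--
--         output_ranking.append((k, n))
--
--     return output_ranking
-- ===== SOURCE B (Python) =====
-- def ranking_normalizer(ascending_pair_list):
--     # Group the list into runs of equal values and number the runs:
--     # the run index is the dense rank of every key in the run.
--     # A reversed copy lets us pop the runs off the front in O(1).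
--     output = []
--     stack = list(reversed(ascending_pair_list))
--     rank = 0
--     while stack:
--         k, v = stack.pop()           # first element of the next run
--         output.append((k, rank))
--         while stack and stack[-1][1] == v:   # rest of the run
--             output.append((stack.pop()[0], rank))
--         rank += 1
--     return output
-- ===== Notes on version B (the rewrite author's own statement) =====
-- stated objective: alternative
-- what changed: B numbers maximal runs of equal values (consume a whole run, emit its rank, advance the rank) instead of A's indexed enumerate loop that compares each element's value with its predecessor via ascending_pair_list[i-1] and a running counter.
import Mathlib
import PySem

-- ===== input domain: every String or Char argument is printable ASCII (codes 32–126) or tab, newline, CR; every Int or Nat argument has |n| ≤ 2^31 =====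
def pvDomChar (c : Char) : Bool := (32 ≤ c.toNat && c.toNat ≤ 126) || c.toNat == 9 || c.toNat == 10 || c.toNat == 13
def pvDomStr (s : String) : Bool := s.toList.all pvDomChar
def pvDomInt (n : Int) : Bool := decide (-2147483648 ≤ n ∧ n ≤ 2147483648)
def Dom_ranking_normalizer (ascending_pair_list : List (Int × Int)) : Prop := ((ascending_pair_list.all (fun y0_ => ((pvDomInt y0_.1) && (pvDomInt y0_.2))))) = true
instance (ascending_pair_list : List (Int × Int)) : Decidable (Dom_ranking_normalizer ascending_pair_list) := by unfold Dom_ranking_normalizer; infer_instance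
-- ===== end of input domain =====

-- B groups the input into maximal runs of equal values and numbers the runs;
-- same return value as A, no speed claim. A's loop is ported literally below.

-- ===== PORT A =====
-- literal port of A: fold over enumerate, state = (output_ranking, n),
-- predecessor looked up by index in the full list as in A.
def ranking_normalizer (ascending_pair_list : List (Int × Int)) : List (Int × Int) :=
  ((PySem.List.enumerate ascending_pair_list 0).foldl
    (fun (st : List (Int × Int) × Int) ikv =>
      let i := ikv.1
      let k := ikv.2.1
      let v := ikv.2.2
      let n :=
        if st.1 ≠ [] ∧
            (PySem.List.pyGet? ascending_pair_list (i - 1)).map Prod.snd ≠ some v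
        then st.2 + 1 else st.2
      (st.1 ++ [(k, n)], n))
    ([], 0)).1

-- ===== PORT B =====
-- port of Source B: the reversed stack is Python's O(1)-pop idiom for consuming the
-- list front to back, rendered as structural recursion; the inner pop-while loop
-- that drains the rest of the current run is takeWhile/dropWhile on the tail.
def pvRnGo : List (Int × Int) → Int → List (Int × Int)
  | [], _ => []
  | (k, v) :: rest, rank =>
      (k, rank) :: (rest.takeWhile (fun p => p.2 == v)).map (fun p => (p.1, rank))
        ++ pvRnGo (rest.dropWhile (fun p => p.2 == v)) (rank + 1)
termination_by xs _ => xs.length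
decreasing_by
  have := List.length_dropWhile_le (fun p => p.2 == v) rest
  simp; omega

def ranking_normalizer_alt (ascending_pair_list : List (Int × Int)) : List (Int × Int) :=
  pvRnGo ascending_pair_list 0

-- ===== PRECONDITION & SPEC =====
def Spec_ranking_normalizer (ascending_pair_list : List (Int × Int)) (out : List (Int × Int)) : Prop := out = ranking_normalizer_alt ascending_pair_list
instance (ascending_pair_list : List (Int × Int)) (out : List (Int × Int)) : Decidable (Spec_ranking_normalizer ascending_pair_list out) := by unfold Spec_ranking_normalizer; infer_instance

-- ===== CLAIM (what is proved, stated in full; the proofs are below) =====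
def Claim_equal_ranking_normalizer : Prop := ∀ (ascending_pair_list : List (Int × Int)), Dom_ranking_normalizer ascending_pair_list → Spec_ranking_normalizer ascending_pair_list (ranking_normalizer ascending_pair_list)

-- ===== LEMMAS AND PROOFS =====

-- ===== VERDICT (by name: the statement is the Claim_ definition above) =====
-- A restated as a predecessor-value recursion (proof-only helper).
def pvASimp : Option Int → Int → List (Int × Int) → List (Int × Int)
  | _, _, [] => []
  | prev, n, (k, v) :: rest =>
      let n' := match prev with
        | none => n
        | some p => if v ≠ p then n + 1 else n
      (k, n') :: pvASimp (some v) n' rest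

theorem pvLoopA (suf : List (Int × Int)) : ∀ (pre acc : List (Int × Int)) (n : Int),
    acc.length = pre.length →
    ((PySem.List.enumerate suf (pre.length : Int)).foldl
      (fun (st : List (Int × Int) × Int) ikv =>
        let i := ikv.1
        let k := ikv.2.1
        let v := ikv.2.2
        let n :=
          if st.1 ≠ [] ∧
              (PySem.List.pyGet? (pre ++ suf) (i - 1)).map Prod.snd ≠ some v
          then st.2 + 1 else st.2
        (st.1 ++ [(k, n)], n))
      (acc, n)).1
    = acc ++ pvASimp ((pre.getLast?).map Prod.snd) n suf := by
  induction suf with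
  | nil => intro pre acc n h; simp [PySem.List.enumerate, pvASimp]
  | cons hd tl ih =>
    intro pre acc n h
    obtain ⟨k, v⟩ := hd
    rw [PySem.List.enumerate_cons, List.foldl_cons]
    rcases List.eq_nil_or_concat pre with hpre | ⟨pre', p, hpre⟩
    · subst hpre
      have hacc : acc = [] := List.eq_nil_of_length_eq_zero h
      subst hacc
      have h2 := ih [(k, v)] [(k, n)] n (by simp)
      simp only [List.singleton_append, List.length_singleton, Nat.cast_one,
        List.getLast?_singleton, Option.map_some] at h2
      simp only [List.nil_append, List.length_nil, Nat.cast_zero, zero_add,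
        ne_eq, not_true_eq_false, false_and, if_false, List.getLast?_nil,
        Option.map_none]
      simp only [ne_eq] at h2
      simpa [pvASimp] using h2
    · have hpre2 : pre = pre' ++ [p] := by simpa [List.concat_eq_append] using hpre
      subst hpre2
      have hacc : acc ≠ [] := by
        intro hc; subst hc; simp at h
      have hget : PySem.List.pyGet? ((pre' ++ [p]) ++ (k, v) :: tl)
          (((pre' ++ [p]).length : Int) - 1) = some p := by
        rw [show ((pre' ++ [p]).length : Int) - 1 = (pre'.length : Int) by simp,
          List.append_assoc, List.singleton_append]
        exact PySem.List.pyGet?_append_length pre' ((k, v) :: tl) p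
      simp only [hget]
      have h2 := ih ((pre' ++ [p]) ++ [(k, v)])
        (acc ++ [(k, if acc ≠ [] ∧ Option.map Prod.snd (some p) ≠ some v then n + 1 else n)])
        (if acc ≠ [] ∧ Option.map Prod.snd (some p) ≠ some v then n + 1 else n) (by simp [h])
      rw [show ((pre' ++ [p]) ++ [(k, v)]) ++ tl = (pre' ++ [p]) ++ (k, v) :: tl by simp] at h2
      rw [show (((pre' ++ [p]) ++ [(k, v)]).length : Int)
            = ((pre' ++ [p]).length : Int) + 1 by simp; omega] at h2
      rw [h2]
      simp only [List.getLast?_concat, Option.map_some, pvASimp]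
      have hn2 : (if v ≠ p.2 then n + 1 else n)
          = (if acc ≠ [] ∧ Option.map Prod.snd (some p) ≠ some v then n + 1 else n) := by
        by_cases hv : v = p.2 <;> simp [hacc, hv, eq_comm]
      rw [hn2]
      simp

theorem pvRnGo_cons (k v rank : Int) (rest : List (Int × Int)) :
    pvRnGo ((k, v) :: rest) rank
      = (k, rank) :: (rest.takeWhile (fun p => p.2 == v)).map (fun p => (p.1, rank))
        ++ pvRnGo (rest.dropWhile (fun p => p.2 == v)) (rank + 1) := by
  rw [pvRnGo.eq_def]

theorem pvKey (rest : List (Int × Int)) : ∀ (v n : Int),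
    pvASimp (some v) n rest
      = (rest.takeWhile (fun p => p.2 == v)).map (fun p => (p.1, n))
        ++ pvRnGo (rest.dropWhile (fun p => p.2 == v)) (n + 1) := by
  induction rest with
  | nil => intro v n; simp [pvASimp, pvRnGo]
  | cons hd r ih =>
    intro v n
    obtain ⟨k', w⟩ := hd
    by_cases hw : w = v
    · subst hw
      simp [pvASimp, ih w n]
    · have hne : w ≠ v := hw
      simp [pvASimp, hne, pvRnGo_cons, ih w (n + 1)]

theorem pvAB (xs : List (Int × Int)) : pvASimp none 0 xs = pvRnGo xs 0 := by
  cases xs with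
  | nil => simp [pvASimp, pvRnGo]
  | cons hd rest =>
    obtain ⟨k, v⟩ := hd
    simp [pvASimp, pvRnGo_cons, pvKey rest v 0]

-- ===== VERDICT =====
theorem ranking_normalizer_spec : Claim_equal_ranking_normalizer := by
  intro xs _
  unfold Spec_ranking_normalizer ranking_normalizer ranking_normalizer_alt
  have h := pvLoopA xs [] [] 0 rfl
  simpa [pvAB xs] using h
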